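-- pv_equiv track=rewrite | github.com/prateekralhan/FinancialQnA | evaluation_system.py | prepare_test_dataset
-- ===== SOURCE A (Python) =====
-- from typing import List, Dict, Tuple, Optional
--
-- def prepare_test_dataset(qa_pairs: List[Dict[str, str]]) -> Tuple[List[str], List[str]]:
--     """Prepare test dataset from Q&A pairs"""
--
--     # ------------------------------------
--     # Select diverse questions for testing
--     # ------------------------------------
--     test_questions = []
--     ground_truth = []
--
--     # -----------------------------------
--     # Relevant, high-confidence questions
--     # -----------------------------------
--     high_conf_questions = [
--         "What was the company's revenue in 2024?",
--         "What are the total assets?",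
--         "What type of company is this?",
--         "What are the main business segments?"
--     ]
--
--     # ----------------------------------------------
--     # Relevant, low-confidence questions (ambiguous)
--     # ----------------------------------------------
--     low_conf_questions = [
--         "How does the company compare to competitors?",
--         "What are the growth trends?",
--         "What are the risk factors?"
--     ]
--
--     # --------------------
--     # Irrelevant questions
--     # --------------------
--     irrelevant_questions = [
--         "What is the capital of France?",
--         "How do you cook pasta?",
--         "What is the weather like today?"
--     ]
--
--     # --------------------------
--     # Combine all question types
--     # --------------------------
--     all_questions = high_conf_questions + low_conf_questions + irrelevant_questions
--
--     # -----------------------------------------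
--     # Find corresponding answers from Q&A pairs
--     # -----------------------------------------
--     for question in all_questions:
--
--         # ----------------------------------------------------
--         # For relevant questions, try to find matching answers
--         # ----------------------------------------------------
--         if question in [qa['question'] for qa in qa_pairs]:
--             matching_qa = next(qa for qa in qa_pairs if qa['question'] == question)
--             test_questions.append(question)
--             ground_truth.append(matching_qa['answer'])
--         else:
--
--             # --------------------------------------------------------
--             # For questions not in our dataset, use expected responses
--             # --------------------------------------------------------
--             if question in high_conf_questions:
--                 test_questions.append(question)
--                 ground_truth.append("This information should be available in the financial statements.")
--             elif question in low_conf_questions: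
--                 test_questions.append(question)
--                 ground_truth.append("This information may be partially available or require interpretation.")
--             else:  # irrelevant questions
--                 test_questions.append(question)
--                 ground_truth.append("This question is not related to financial data.")
--
--     return test_questions, ground_truth
-- ===== SOURCE B (Python) =====
-- def prepare_test_dataset(qa_pairs):
--     """Prepare test dataset from Q&A pairs"""
--     groups = [
--         (["What was the company's revenue in 2024?",
--           "What are the total assets?",
--           "What type of company is this?",
--           "What are the main business segments?"],
--          "This information should be available in the financial statements."),
--         (["How does the company compare to competitors?",
--           "What are the growth trends?",
--           "What are the risk factors?"],
--          "This information may be partially available or require interpretation."),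
--         (["What is the capital of France?",
--           "How do you cook pasta?",
--           "What is the weather like today?"],
--          "This question is not related to financial data."),
--     ]
--     test_questions = [q for qs, _ in groups for q in qs]
--     # Prefill the answers with each category's expected response, then patch
--     # them from the data: scan qa_pairs in REVERSE and overwrite in place, so
--     # the first occurrence of a question in qa_pairs is the one that sticks.
--     ground_truth = [default for qs, default in groups for _ in qs]
--     for qa in reversed(qa_pairs):
--         q = qa['question']
--         if q in test_questions:
--             ground_truth[test_questions.index(q)] = qa.get('answer', '')
--     return test_questions, ground_truth
-- ===== Notes on version B (the rewrite author's own statement) =====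
-- stated objective: alternative
-- what changed: A drives a loop over the ten fixed questions, rescanning qa_pairs per question (membership comprehension + next()) with an elif classification chain; B inverts the traversal: it prefills ground_truth with the per-category expected responses, then makes one reverse pass over qa_pairs overwriting the answer slot in place so the first occurrence wins.
import Mathlib
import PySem

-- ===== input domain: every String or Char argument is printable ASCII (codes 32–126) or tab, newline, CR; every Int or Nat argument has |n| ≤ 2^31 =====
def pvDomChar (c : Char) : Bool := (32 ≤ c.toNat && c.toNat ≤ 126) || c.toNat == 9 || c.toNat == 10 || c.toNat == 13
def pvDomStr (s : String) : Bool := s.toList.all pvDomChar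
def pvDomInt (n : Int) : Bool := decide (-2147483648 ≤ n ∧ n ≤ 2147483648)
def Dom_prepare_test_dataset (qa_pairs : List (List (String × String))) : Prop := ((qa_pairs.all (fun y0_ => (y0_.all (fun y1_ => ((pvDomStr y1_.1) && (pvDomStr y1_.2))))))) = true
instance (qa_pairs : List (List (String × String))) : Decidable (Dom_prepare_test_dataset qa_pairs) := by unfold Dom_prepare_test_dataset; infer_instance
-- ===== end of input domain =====

-- B inverts A's traversal: instead of looping over the ten fixed questions and rescanning
-- qa_pairs per question (membership + next() + elif chain), B prefills ground_truth with the
-- per-category expected responses and makes one reverse pass over qa_pairs, overwriting the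
-- matching slot in place so the first occurrence wins — objective: alternative decomposition.

-- the three fixed question lists and defaults (shared data of both programs)
def pvHighQ : List String :=
  ["What was the company's revenue in 2024?",
   "What are the total assets?",
   "What type of company is this?",
   "What are the main business segments?"]
def pvLowQ : List String :=
  ["How does the company compare to competitors?",
   "What are the growth trends?",
   "What are the risk factors?"]
def pvIrrQ : List String :=
  ["What is the capital of France?",
   "How do you cook pasta?",
   "What is the weather like today?"]
def pvDefHigh : String := "This information should be available in the financial statements."
def pvDefLow : String := "This information may be partially available or require interpretation."
def pvDefIrr : String := "This question is not related to financial data."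

-- ===== PORT A =====
-- qa['question'] is ported as getD "question" "" : Pre_ guarantees the key is present
-- (Python raises KeyError otherwise); likewise the matched dict's 'answer'.
def prepare_test_dataset (qa_pairs : List (List (String × String))) : List String × List String :=
  let all_questions := pvHighQ ++ pvLowQ ++ pvIrrQ
  all_questions.foldl (fun acc question =>
    if (qa_pairs.map (fun qa => (PySem.Dict.ofList qa).getD "question" "")).contains question then
      -- next(qa for qa in qa_pairs if qa['question'] == question): first match (guarded, so it exists)
      match qa_pairs.find? (fun qa => (PySem.Dict.ofList qa).getD "question" "" == question) with
      | some matching_qa =>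
          (acc.1 ++ [question], acc.2 ++ [(PySem.Dict.ofList matching_qa).getD "answer" ""])
      | none => (acc.1 ++ [question], acc.2 ++ [""])  -- unreachable: membership test above
    else if pvHighQ.contains question then
      (acc.1 ++ [question], acc.2 ++ [pvDefHigh])
    else if pvLowQ.contains question then
      (acc.1 ++ [question], acc.2 ++ [pvDefLow])
    else
      (acc.1 ++ [question], acc.2 ++ [pvDefIrr]))
    ([], [])

-- ===== PORT B =====
-- transliteration of Source B: prefill ground_truth with category defaults, then patch it
-- from a reverse pass over qa_pairs (qa.get('answer','') → getD "answer" "";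
-- test_questions.index(q) → PySem.List.index?, guarded by the contains test as in Source B).
def prepare_test_dataset_alt (qa_pairs : List (List (String × String))) : List String × List String :=
  let groups : List (List String × String) :=
    [(pvHighQ, pvDefHigh), (pvLowQ, pvDefLow), (pvIrrQ, pvDefIrr)]
  let test_questions := groups.flatMap (fun g => g.1)
  let ground_truth0 := groups.flatMap (fun g => g.1.map (fun _ => g.2))
  let ground_truth := qa_pairs.reverse.foldl (fun gt qa =>
      let q := (PySem.Dict.ofList qa).getD "question" ""   -- qa['question']; Pre_ guarantees the key
      if test_questions.contains q then
        match PySem.List.index? test_questions q with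
        | some i => gt.set i ((PySem.Dict.ofList qa).getD "answer" "")
        | none => gt  -- unreachable: guarded by the contains test
      else gt) ground_truth0
  (test_questions, ground_truth)

-- ===== PRECONDITION & SPEC =====
-- Pre_ excludes exactly the inputs on which Python A raises KeyError: a dict without a
-- 'question' key, or a first dict matching one of the ten test questions without an 'answer' key.
def Pre_prepare_test_dataset (qa_pairs : List (List (String × String))) : Prop :=
  (∀ qa ∈ qa_pairs, (PySem.Dict.ofList qa).contains "question" = true) ∧
  (∀ q ∈ pvHighQ ++ pvLowQ ++ pvIrrQ,
    ∀ m ∈ qa_pairs.find? (fun qa => (PySem.Dict.ofList qa).getD "question" "" == q),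
      (PySem.Dict.ofList m).contains "answer" = true)
instance (qa_pairs : List (List (String × String))) : Decidable (Pre_prepare_test_dataset qa_pairs) := by
  unfold Pre_prepare_test_dataset; infer_instance

def pvWitness_prepare_test_dataset : (List (List (String × String))) :=
  [[("question", "What are the total assets?"), ("answer", "$10M")],
   [("question", "other"), ("answer", "x")]]

def Spec_prepare_test_dataset (qa_pairs : List (List (String × String))) (out : List String × List String) : Prop := out = prepare_test_dataset_alt qa_pairs
instance (qa_pairs : List (List (String × String))) (out : List String × List String) : Decidable (Spec_prepare_test_dataset qa_pairs out) := by unfold Spec_prepare_test_dataset; infer_instance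

-- ===== CLAIM =====
def Claim_equal_prepare_test_dataset : Prop := ∀ (qa_pairs : List (List (String × String))), Dom_prepare_test_dataset qa_pairs → Pre_prepare_test_dataset qa_pairs → Spec_prepare_test_dataset qa_pairs (prepare_test_dataset qa_pairs)

-- ===== LEMMAS AND PROOFS =====

-- proof-side names
def pvQ : List String := pvHighQ ++ pvLowQ ++ pvIrrQ
def pvD0 : List String :=
  [pvDefHigh, pvDefHigh, pvDefHigh, pvDefHigh, pvDefLow, pvDefLow, pvDefLow,
   pvDefIrr, pvDefIrr, pvDefIrr]
def pvKey (qa : List (String × String)) : String := (PySem.Dict.ofList qa).getD "question" ""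
def pvAns (qa : List (String × String)) : String := (PySem.Dict.ofList qa).getD "answer" ""

-- B's loop body, named
def pvStep (gt : List String) (qa : List (String × String)) : List String :=
  if pvQ.contains (pvKey qa) then
    match PySem.List.index? pvQ (pvKey qa) with
    | some i => gt.set i (pvAns qa)
    | none => gt
  else gt

-- the default A's elif chain picks for a question
def pvDef (q : String) : String :=
  if pvHighQ.contains q then pvDefHigh
  else if pvLowQ.contains q then pvDefLow
  else pvDefIrr

-- the answer A's combined loop appends for one question
def pvAnsA (qa_pairs : List (List (String × String))) (question : String) : String :=
  if (qa_pairs.map pvKey).contains question then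
    match qa_pairs.find? (fun qa => pvKey qa == question) with
    | some matching_qa => pvAns matching_qa
    | none => ""
  else pvDef question

-- A's fold appends each question and its pvAnsA answer
theorem pvFoldlA (l : List (List (String × String))) (qs : List String)
    (acc : List String × List String) :
    qs.foldl (fun acc question =>
      if (l.map (fun qa => (PySem.Dict.ofList qa).getD "question" "")).contains question then
        match l.find? (fun qa => (PySem.Dict.ofList qa).getD "question" "" == question) with
        | some matching_qa =>
            (acc.1 ++ [question], acc.2 ++ [(PySem.Dict.ofList matching_qa).getD "answer" ""])
        | none => (acc.1 ++ [question], acc.2 ++ [""])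
      else if pvHighQ.contains question then
        (acc.1 ++ [question], acc.2 ++ [pvDefHigh])
      else if pvLowQ.contains question then
        (acc.1 ++ [question], acc.2 ++ [pvDefLow])
      else
        (acc.1 ++ [question], acc.2 ++ [pvDefIrr])) acc
    = (acc.1 ++ qs, acc.2 ++ qs.map (pvAnsA l)) := by
  induction qs generalizing acc with
  | nil => simp
  | cons q qs ih =>
    rw [List.foldl_cons, ih]
    have hstep : (if (l.map (fun qa => (PySem.Dict.ofList qa).getD "question" "")).contains q then
        match l.find? (fun qa => (PySem.Dict.ofList qa).getD "question" "" == q) with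
        | some matching_qa =>
            (acc.1 ++ [q], acc.2 ++ [(PySem.Dict.ofList matching_qa).getD "answer" ""])
        | none => (acc.1 ++ [q], acc.2 ++ [""])
      else if pvHighQ.contains q then (acc.1 ++ [q], acc.2 ++ [pvDefHigh])
      else if pvLowQ.contains q then (acc.1 ++ [q], acc.2 ++ [pvDefLow])
      else (acc.1 ++ [q], acc.2 ++ [pvDefIrr]))
      = (acc.1 ++ [q], acc.2 ++ [pvAnsA l q]) := by
      unfold pvAnsA pvKey pvAns pvDef
      split
      · split <;> rfl
      · split
        · rfl
        · split <;> rfl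
    rw [hstep]
    simp [List.append_assoc]

theorem pvQ_nodup : pvQ.Nodup := by decide

-- one pvStep on a mapped state rewrites the whole map pointwise
theorem pvStep_map (f : String → String) (qa : List (String × String)) :
    pvStep (pvQ.map f) qa
      = pvQ.map (fun q => if pvKey qa == q then pvAns qa else f q) := by
  unfold pvStep
  by_cases hc : pvQ.contains (pvKey qa)
  · rw [if_pos hc]
    rcases hidx : PySem.List.index? pvQ (pvKey qa) with _ | j
    · rw [PySem.List.index?_eq_idxOf?] at hidx
      have hmem : pvKey qa ∈ pvQ := by simpa using hc
      have := List.isSome_idxOf?.mpr hmem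
      rw [hidx] at this
      simp at this
    · obtain ⟨hj, hjq, _⟩ := PySem.List.getElem_of_index?_eq_some hidx
      apply List.ext_getElem
      · simp
      · intro i h1 h2
        have hi : i < pvQ.length := by simpa using h2
        rw [List.getElem_map]
        by_cases hij : i = j
        · subst hij
          rw [List.getElem_set_self (by simpa using hj)]
          simp [hjq.symm]
        · rw [List.getElem_set_ne (by omega)]
          have hne : pvQ[i] ≠ pvKey qa := by
            intro he
            exact hij (pvQ_nodup.getElem_inj_iff.mp (he.trans hjq.symm))
          simp [List.getElem_map]
          intro he
          exact absurd he.symm hne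
  · rw [if_neg hc]
    symm
    apply List.map_congr_left
    intro q hq
    have hne : pvKey qa ≠ q := by
      intro he
      exact hc (by rw [he]; exact List.contains_iff_mem.mpr hq)
    simp [hne]

-- the reverse loop, as a foldr, computes first-match-or-default for every question
theorem pvLoop (l : List (List (String × String))) :
    l.foldr (fun qa gt => pvStep gt qa) pvD0
      = pvQ.map (fun q =>
          match l.find? (fun qa => pvKey qa == q) with
          | some m => pvAns m
          | none => pvDef q) := by
  induction l with
  | nil =>
    rw [List.foldr_nil]
    decide
  | cons qa l ih =>
    rw [List.foldr_cons, ih, pvStep_map]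
    apply List.map_congr_left
    intro q _
    rw [List.find?_cons]
    by_cases h : pvKey qa == q
    · simp [h]
    · simp [h]

-- A's per-question answer coincides with B's first-match-or-default value
theorem pvAnsA_eq (l : List (List (String × String))) (q : String) :
    pvAnsA l q
      = (match l.find? (fun qa => pvKey qa == q) with
         | some m => pvAns m
         | none => pvDef q) := by
  unfold pvAnsA
  rcases hf : l.find? (fun qa => pvKey qa == q) with _ | m
  · have hc : (l.map pvKey).contains q = false := by
      rw [List.find?_eq_none] at hf
      simp only [List.contains_eq_any_beq, List.any_map, List.any_eq_false,
        Function.comp_apply, beq_iff_eq]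
      intro x hx
      have hx2 := hf x hx
      simp only [beq_iff_eq] at hx2
      exact fun h => hx2 h.symm
    rw [if_neg (by rw [hc]; simp)]
  · have hm := List.find?_some hf
    have hmem := List.mem_of_find?_eq_some hf
    have hc : (l.map pvKey).contains q = true := by
      simp only [List.contains_eq_any_beq, List.any_map, List.any_eq_true,
        Function.comp_apply, beq_iff_eq]
      have hm2 : pvKey m = q := by simpa using hm
      exact ⟨m, hmem, hm2.symm⟩
    rw [if_pos hc]

-- ===== VERDICT =====
theorem prepare_test_dataset_spec : Claim_equal_prepare_test_dataset := by
  intro qa_pairs _ _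
  unfold Spec_prepare_test_dataset prepare_test_dataset prepare_test_dataset_alt
  rw [pvFoldlA]
  show (pvQ, pvQ.map (pvAnsA qa_pairs))
      = (pvQ, qa_pairs.reverse.foldl (fun gt qa => pvStep gt qa) pvD0)
  rw [List.foldl_reverse, pvLoop]
  exact congrArg _ (List.map_congr_left (fun q _ => pvAnsA_eq qa_pairs q))
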